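-- pv_equiv track=rewrite | github.com/alleyshore43/AI-Call-One-Command-V10 | fix_database_service.py | remove_demo_blocks
-- ===== SOURCE A (Python) =====
-- def remove_demo_blocks(text):
--     lines = text.split('\n')
--     result_lines = []
--     i = 0
--
--     while i < len(lines):
--         line = lines[i]
--
--         # Check if this line starts a demo mode block
--         if 'if (this.isDemoMode())' in line:
--             # Find the matching closing brace
--             brace_count = 0
--             j = i
--
--             # Count opening braces in the if line
--             brace_count += line.count('{') - line.count('}')
--             j += 1
--
--             # Skip until we find the matching closing brace
--             while j < len(lines) and brace_count > 0:
--                 brace_count += lines[j].count('{') - lines[j].count('}')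
--                 j += 1
--
--             # Skip the demo block entirely
--             i = j
--         else:
--             result_lines.append(line)
--             i += 1
--
--     return '\n'.join(result_lines)
-- ===== SOURCE B (Python) =====
-- def remove_demo_blocks(text):
--     lines = text.split('\n')
--     n = len(lines)
--     # pass 1: prefix[k] = total brace delta ({ minus }) of lines[:k]
--     prefix = [0]
--     for line in lines:
--         prefix.append(prefix[-1] + line.count('{') - line.count('}'))
--     # pass 2: close[i] = smallest j >= i with prefix[j+1] <= prefix[i] (a block
--     # opened on line i is closed on line j), or n if it never closes;
--     # computed offline for every line at once with a monotonic stack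
--     close = [n] * n
--     stack = []
--     for j in range(n):
--         stack.append(j)
--         while stack and prefix[j + 1] <= prefix[stack[-1]]:
--             close[stack.pop()] = j
--     # pass 3: walk the lines, jumping over each demo block via close[]
--     out = []
--     i = 0
--     while i < n:
--         line = lines[i]
--         if 'if (this.isDemoMode())' in line:
--             i = close[i] + 1
--         else:
--             out.append(line)
--             i += 1
--     return '\n'.join(out)
-- ===== Notes on version B (the rewrite author's own statement) =====
-- stated objective: alternative
-- what changed: Replaced A's online nested scan (an inner while that re-counts braces forward from each marker) by three staged passes: prefix sums of per-line brace deltas, an offline all-at-once next-smaller-or-equal computation with a monotonic stack giving each line's closing line, and a walk that jumps over marker blocks via that table.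
import Mathlib
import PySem

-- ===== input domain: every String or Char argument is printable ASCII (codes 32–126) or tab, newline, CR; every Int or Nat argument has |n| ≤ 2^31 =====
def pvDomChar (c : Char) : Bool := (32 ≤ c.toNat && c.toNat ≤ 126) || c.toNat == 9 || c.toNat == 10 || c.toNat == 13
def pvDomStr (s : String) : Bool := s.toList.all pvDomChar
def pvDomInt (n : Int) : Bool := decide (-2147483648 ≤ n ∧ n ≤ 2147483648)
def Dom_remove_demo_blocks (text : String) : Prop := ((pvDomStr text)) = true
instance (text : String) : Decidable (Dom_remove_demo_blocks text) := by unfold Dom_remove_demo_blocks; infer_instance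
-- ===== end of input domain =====

-- B replaces A's online nested scan (inner while re-counting braces from each marker)
-- by three staged passes: prefix sums of per-line brace deltas, an offline monotonic-stack
-- next-smaller-or-equal pass giving every line's closing line, and a jump walk (objective: alternative).

-- shared by both ports: the demo-mode marker and a line's brace delta ({ count minus } count)
def pvMarker : String := "if (this.isDemoMode())"

def pvDelta (l : String) : Int :=
  (PySem.Str.count l "{" : Int) - (PySem.Str.count l "}" : Int)

-- ===== PORT A =====
-- Python A's inner 'while j < len(lines) and brace_count > 0' loop, consuming lines
def aSkip : List String → Int → List String
  | [], _ => []
  | l :: ls, bc => if bc > 0 then aSkip ls (bc + pvDelta l) else l :: ls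

theorem aSkip_length_le (ls : List String) : ∀ bc : Int, (aSkip ls bc).length ≤ ls.length := by
  induction ls with
  | nil => intro bc; simp [aSkip]
  | cons l ls ih =>
    intro bc
    by_cases h : bc > 0
    · simp only [aSkip, if_pos h]
      exact Nat.le_succ_of_le (ih _)
    · simp [aSkip, if_neg h]

-- Python A's outer 'while i < len(lines)' loop (i only moves forward, so it is a
-- recursion over the remaining suffix of lines)
def aGo : List String → List String
  | [] => []
  | l :: ls =>
    if PySem.Str.isIn pvMarker l then aGo (aSkip ls (pvDelta l))
    else l :: aGo ls
termination_by ls => ls.length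
decreasing_by
  · exact Nat.lt_succ_of_le (aSkip_length_le ls (pvDelta l))
  · simp

def remove_demo_blocks (text : String) : String :=
  PySem.Str.join "\n" (aGo (((PySem.Str.split? text "\n").getD [])))

-- ===== PORT B =====
-- pass 1: prefix[k] = total brace delta of lines[:k]; 'prefix[-1]' is getLastD
-- (the accumulator starts at [0] and only grows, so it is never empty: exact)
def bPrefix (lines : List String) : List Int :=
  lines.foldl (fun acc line => acc ++ [acc.getLastD 0 + pvDelta line]) [0]

-- the inner 'while stack and prefix[j+1] <= prefix[stack[-1]]' loop of pass 2
-- (stack head = Python's stack[-1]); pops and records close[stack.pop()] = j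
def bPop (pref : List Int) (j : Nat) : List Nat → List Nat → List Nat × List Nat
  | [], close => ([], close)
  | t :: st, close =>
    if pref.getD (j + 1) 0 ≤ pref.getD t 0 then bPop pref j st (close.set t j)
    else (t :: st, close)

-- pass 2: close[i] = line closing a block opened on line i (n if never); all
-- values are in 0..n, so Nat is exact for Python's ints here
def bClose (pref : List Int) (n : Nat) : List Nat :=
  ((List.range n).foldl (fun st j => bPop pref j (j :: st.1) st.2)
    (([] : List Nat), List.replicate n n)).2

-- pass 3: the 'while i < n' jump walk
def bWalk (lines : List String) (close : List Nat) (i : Nat) : List String :=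
  if h : i < lines.length then
    if PySem.Str.isIn pvMarker (lines.getD i "") then
      if h2 : i < close.getD i lines.length + 1 then
        bWalk lines close (close.getD i lines.length + 1)
      else []  -- totality guard only: the computed close table has close[i] ≥ i
    else lines.getD i "" :: bWalk lines close (i + 1)
  else []
termination_by lines.length - i
decreasing_by
  · omega
  · omega

def remove_demo_blocks_alt (text : String) : String :=
  let lines := (PySem.Str.split? text "\n").getD []
  PySem.Str.join "\n" (bWalk lines (bClose (bPrefix lines) lines.length) 0)

-- ===== PRECONDITION & SPEC =====
def Spec_remove_demo_blocks (text : String) (out : String) : Prop := out = remove_demo_blocks_alt text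
instance (text : String) (out : String) : Decidable (Spec_remove_demo_blocks text out) := by unfold Spec_remove_demo_blocks; infer_instance

-- ===== CLAIM (what is proved, stated in full; the proofs are below) =====
def Claim_equal_remove_demo_blocks : Prop := ∀ (text : String), Dom_remove_demo_blocks text → Spec_remove_demo_blocks text (remove_demo_blocks text)

-- ===== LEMMAS AND PROOFS =====

-- Q pref k = prefix[k] as a total function
def Qp (pref : List Int) (k : Nat) : Int := pref.getD k 0

-- spec of close[]: first j ∈ [m, n) with Q (j+1) ≤ Q base, else n
def fc (Q : Nat → Int) (n base m : Nat) : Nat :=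
  if _h : m < n then (if Q (m + 1) ≤ Q base then m else fc Q n base (m + 1)) else n
termination_by n - m

-- spec of A's resume point: first m' ∈ [m, n) with Q m' ≤ Q base, else n
def fl (Q : Nat → Int) (n base m : Nat) : Nat :=
  if _h : m < n then (if Q m ≤ Q base then m else fl Q n base (m + 1)) else n
termination_by n - m

theorem fc_le (Q : Nat → Int) (n base : Nat) : ∀ (m : Nat), fc Q n base m ≤ n := by
  have H : ∀ (fuel m : Nat), n ≤ m + fuel → fc Q n base m ≤ n := by
    intro fuel
    induction fuel with
    | zero => intro m hm; rw [fc, dif_neg (by omega : ¬ m < n)]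
    | succ f ih =>
      intro m hm
      by_cases h1 : m < n
      · rw [fc, dif_pos h1]
        by_cases h2 : Q (m + 1) ≤ Q base
        · rw [if_pos h2]; omega
        · rw [if_neg h2]; exact ih (m + 1) (by omega)
      · rw [fc, dif_neg h1]
  exact fun m => H n m (by omega)

theorem fc_ge (Q : Nat → Int) (n base : Nat) : ∀ (m : Nat), m ≤ n → m ≤ fc Q n base m := by
  have H : ∀ (fuel m : Nat), n ≤ m + fuel → m ≤ n → m ≤ fc Q n base m := by
    intro fuel
    induction fuel with
    | zero => intro m hm h; rw [fc, dif_neg (by omega : ¬ m < n)]; omega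
    | succ f ih =>
      intro m hm h
      by_cases h1 : m < n
      · rw [fc, dif_pos h1]
        by_cases h2 : Q (m + 1) ≤ Q base
        · rw [if_pos h2]
        · rw [if_neg h2]
          have := ih (m + 1) (by omega) (by omega)
          omega
      · rw [fc, dif_neg h1]; omega
  exact fun m h => H n m (by omega) h

theorem fc_hit (Q : Nat → Int) (n base : Nat) : ∀ (m : Nat), fc Q n base m < n →
    Q (fc Q n base m + 1) ≤ Q base := by
  have H : ∀ (fuel m : Nat), n ≤ m + fuel → fc Q n base m < n → Q (fc Q n base m + 1) ≤ Q base := by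
    intro fuel
    induction fuel with
    | zero => intro m hm h; rw [fc, dif_neg (by omega : ¬ m < n)] at h; omega
    | succ f ih =>
      intro m hm h
      by_cases h1 : m < n
      · rw [fc, dif_pos h1] at h ⊢
        by_cases h2 : Q (m + 1) ≤ Q base
        · rw [if_pos h2]; exact h2
        · rw [if_neg h2] at h ⊢; exact ih (m + 1) (by omega) h
      · rw [fc, dif_neg h1] at h; omega
  exact fun m => H n m (by omega)

theorem fc_not_before (Q : Nat → Int) (n base : Nat) : ∀ (m k : Nat),
    m ≤ k → k < fc Q n base m → ¬ Q (k + 1) ≤ Q base := by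
  have H : ∀ (fuel m k : Nat), n ≤ m + fuel → m ≤ k → k < fc Q n base m → ¬ Q (k + 1) ≤ Q base := by
    intro fuel
    induction fuel with
    | zero =>
      intro m k hm hk h
      rw [fc, dif_neg (by omega : ¬ m < n)] at h; omega
    | succ f ih =>
      intro m k hm hk h
      by_cases h1 : m < n
      · rw [fc, dif_pos h1] at h
        by_cases h2 : Q (m + 1) ≤ Q base
        · rw [if_pos h2] at h; omega
        · rw [if_neg h2] at h
          rcases Nat.eq_or_lt_of_le hk with rfl | hk'
          · exact h2
          · exact ih (m + 1) k (by omega) (by omega) h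
      · rw [fc, dif_neg h1] at h; omega
  exact fun m k => H n m k (by omega)

theorem fl_fc (Q : Nat → Int) (n base : Nat) : ∀ (m : Nat),
    fl Q n base (m + 1) = min (fc Q n base m + 1) n := by
  have H : ∀ (fuel m : Nat), n ≤ m + fuel → fl Q n base (m + 1) = min (fc Q n base m + 1) n := by
    intro fuel
    induction fuel with
    | zero =>
      intro m hm
      rw [fc, dif_neg (by omega : ¬ m < n), fl, dif_neg (by omega : ¬ m + 1 < n)]
      omega
    | succ f ih =>
      intro m hm
      by_cases h1 : m < n
      · rw [fc, dif_pos h1]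
        by_cases h2 : Q (m + 1) ≤ Q base
        · rw [if_pos h2]
          by_cases h3 : m + 1 < n
          · rw [fl, dif_pos h3, if_pos h2]; omega
          · rw [fl, dif_neg h3]; omega
        · rw [if_neg h2]
          by_cases h3 : m + 1 < n
          · rw [fl, dif_pos h3, if_neg h2]
            exact ih (m + 1) (by omega)
          · rw [fl, dif_neg h3, fc, dif_neg h3]; omega
      · rw [fc, dif_neg h1, fl, dif_neg (by omega : ¬ m + 1 < n)]; omega
  exact fun m => H n m (by omega)

-- prefix-list facts
theorem bPrefix_append (lines : List String) (l : String) :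
    bPrefix (lines ++ [l]) = bPrefix lines ++ [(bPrefix lines).getLastD 0 + pvDelta l] := by
  simp [bPrefix, List.foldl_append]

theorem bPrefix_length (lines : List String) : (bPrefix lines).length = lines.length + 1 := by
  induction lines using List.reverseRecOn with
  | nil => rfl
  | append_singleton ls l ih => rw [bPrefix_append]; simp [ih]

theorem bPrefix_getLast (lines : List String) :
    (bPrefix lines).getLastD 0 = Qp (bPrefix lines) lines.length := by
  cases lines using List.reverseRecOn with
  | nil => rfl
  | append_singleton ls l =>
    rw [bPrefix_append, Qp, List.getLastD_concat,
      List.getD_eq_getElem?_getD, List.getElem?_append_right (by simp [bPrefix_length])]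
    simp [bPrefix_length]

theorem Qp_succ (lines : List String) : ∀ (k : Nat), k < lines.length →
    Qp (bPrefix lines) (k + 1) = Qp (bPrefix lines) k + pvDelta (lines.getD k "") := by
  induction lines using List.reverseRecOn with
  | nil => intro k hk; simp at hk
  | append_singleton ls l ih =>
    intro k hk
    rw [bPrefix_append]
    rcases Nat.lt_or_ge k ls.length with hk' | hk'
    · rw [Qp, Qp, List.getD_eq_getElem?_getD, List.getElem?_append_left (by simp [bPrefix_length]; omega),
        List.getD_eq_getElem?_getD (l := bPrefix ls ++ _) (i := k),
        List.getElem?_append_left (by simp [bPrefix_length]; omega),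
        List.getD_eq_getElem?_getD (l := ls ++ [l]), List.getElem?_append_left hk']
      have := ih k hk'
      rw [Qp, Qp, List.getD_eq_getElem?_getD, List.getD_eq_getElem?_getD] at this
      rw [this, List.getD_eq_getElem?_getD]
    · have hk2 : k = ls.length := by simp at hk; omega
      subst hk2
      rw [Qp, Qp, List.getD_eq_getElem?_getD,
        List.getElem?_append_right (by simp [bPrefix_length]),
        List.getD_eq_getElem?_getD (i := ls.length),
        List.getElem?_append_left (by simp [bPrefix_length]),
        List.getD_eq_getElem?_getD (l := ls ++ [l]),
        List.getElem?_append_right (Nat.le_refl _)]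
      have hlast := bPrefix_getLast ls
      rw [Qp, List.getD_eq_getElem?_getD] at hlast
      simp only [List.getElem?_eq_getElem
          (by simp [bPrefix_length] : ls.length < (bPrefix ls).length),
        Option.getD_some] at hlast
      simp [bPrefix_length, -List.getLastD_eq_getLast?, hlast]

-- A's inner loop lands exactly at the fl-spec point
theorem aSkip_nonpos (ls : List String) (bc : Int) (h : ¬ bc > 0) : aSkip ls bc = ls := by
  cases ls with
  | nil => rfl
  | cons l ls => simp [aSkip, if_neg h]

theorem aSkip_drop (lines : List String) (base : Nat) : ∀ (fuel j : Nat),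
    lines.length ≤ j + fuel →
    aSkip (lines.drop j) (Qp (bPrefix lines) j - Qp (bPrefix lines) base)
      = lines.drop (fl (Qp (bPrefix lines)) lines.length base j) := by
  intro fuel
  induction fuel with
  | zero =>
    intro j hj
    rw [List.drop_of_length_le (by omega), fl, dif_neg (by omega : ¬ j < lines.length),
      List.drop_length]
    rfl
  | succ f ih =>
    intro j hj
    by_cases h1 : j < lines.length
    · by_cases h2 : Qp (bPrefix lines) j ≤ Qp (bPrefix lines) base
      · rw [fl, dif_pos h1, if_pos h2]
        exact aSkip_nonpos _ _ (by omega)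
      · rw [fl, dif_pos h1, if_neg h2, List.drop_eq_getElem_cons h1]
        have hbc : Qp (bPrefix lines) j - Qp (bPrefix lines) base > 0 := by omega
        rw [show aSkip (lines[j] :: lines.drop (j + 1))
              (Qp (bPrefix lines) j - Qp (bPrefix lines) base)
            = aSkip (lines.drop (j + 1))
              (Qp (bPrefix lines) j - Qp (bPrefix lines) base + pvDelta lines[j])
          from by rw [aSkip, if_pos hbc]]
        have hQ := Qp_succ lines j h1
        rw [List.getD_eq_getElem _ _ h1] at hQ
        rw [show Qp (bPrefix lines) j - Qp (bPrefix lines) base + pvDelta lines[j]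
            = Qp (bPrefix lines) (j + 1) - Qp (bPrefix lines) base from by omega]
        exact ih (j + 1) (by omega)
    · rw [List.drop_of_length_le (by omega), fl, dif_neg h1, List.drop_length]
      rfl

-- ===== stack correctness =====

def sFold (pref : List Int) (n J : Nat) : List Nat × List Nat :=
  (List.range J).foldl (fun st j => bPop pref j (j :: st.1) st.2)
    (([] : List Nat), List.replicate n n)

def pvInv (pref : List Int) (n J : Nat) (st : List Nat) (close : List Nat) : Prop :=
  (∀ i, i ∈ st ↔ (i < J ∧ J ≤ fc (Qp pref) n i i)) ∧
  st.Pairwise (· > ·) ∧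
  close.length = n ∧
  (∀ i, i < n → close.getD i n =
    if fc (Qp pref) n i i < J then fc (Qp pref) n i i else n)

-- the result stack is a suffix of the input stack (pops remove from the top)
theorem bPop_suffix (pref : List Int) (j : Nat) : ∀ (s close : List Nat),
    (bPop pref j s close).1 <:+ s := by
  intro s
  induction s with
  | nil => intro close; exact List.suffix_rfl
  | cons t st ih =>
    intro close
    by_cases h : pref.getD (j + 1) 0 ≤ pref.getD t 0
    · rw [bPop, if_pos h]
      exact (ih _).trans (List.suffix_cons t st)
    · rw [bPop, if_neg h]

theorem bPop_close_length (pref : List Int) (j : Nat) : ∀ (s close : List Nat),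
    (bPop pref j s close).2.length = close.length := by
  intro s
  induction s with
  | nil => intro close; rfl
  | cons t st ih =>
    intro close
    by_cases h : pref.getD (j + 1) 0 ≤ pref.getD t 0
    · rw [bPop, if_pos h, ih]; simp
    · rw [bPop, if_neg h]

-- what bPop does, given that keys strictly increase toward the top of the stack:
-- it pops (and records j for) exactly the entries whose key is ≥ prefix[j+1]
theorem bPop_char (pref : List Int) (j : Nat) : ∀ (s close : List Nat),
    s.Pairwise (· > ·) →
    (∀ a ∈ s, ∀ b ∈ s, a < b → pref.getD a 0 < pref.getD b 0) →
    (∀ i, i ∈ (bPop pref j s close).1 ↔ (i ∈ s ∧ ¬ pref.getD (j + 1) 0 ≤ pref.getD i 0)) ∧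
    (∀ i d, i < close.length →
      (bPop pref j s close).2.getD i d =
        if i ∈ s ∧ pref.getD (j + 1) 0 ≤ pref.getD i 0 then j else close.getD i d) := by
  intro s
  induction s with
  | nil =>
    intro close _ _
    constructor
    · intro i; simp [bPop]
    · intro i d _; simp [bPop]
  | cons t st ih =>
    intro close hsort hmono
    by_cases h : pref.getD (j + 1) 0 ≤ pref.getD t 0
    · rw [bPop, if_pos h]
      obtain ⟨ih1, ih2⟩ := ih (close.set t j) (List.Pairwise.of_cons hsort)
        (fun a ha b hb => hmono a (List.mem_cons_of_mem t ha) b (List.mem_cons_of_mem t hb))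
      constructor
      · intro i
        rw [ih1 i]
        constructor
        · rintro ⟨hi, hc⟩; exact ⟨List.mem_cons_of_mem t hi, hc⟩
        · rintro ⟨hi, hc⟩
          rcases List.mem_cons.mp hi with rfl | hi
          · exact absurd h hc
          · exact ⟨hi, hc⟩
      · intro i d hi
        rw [ih2 i d (by simpa using hi)]
        by_cases hit : i = t
        · subst hit
          by_cases h2 : i ∈ st ∧ pref.getD (j + 1) 0 ≤ pref.getD i 0
          · rw [if_pos h2, if_pos ⟨List.mem_cons_self, h⟩]
          · rw [if_neg h2, if_pos ⟨List.mem_cons_self, h⟩,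
              List.getD_eq_getElem?_getD, List.getElem?_set_self (by omega)]
            simp
        · have hset : (close.set t j).getD i d = close.getD i d := by
            rw [List.getD_eq_getElem?_getD, List.getElem?_set_ne (by omega),
              List.getD_eq_getElem?_getD]
          rw [hset]
          by_cases h2 : i ∈ st ∧ pref.getD (j + 1) 0 ≤ pref.getD i 0
          · rw [if_pos h2, if_pos ⟨List.mem_cons_of_mem t h2.1, h2.2⟩]
          · rw [if_neg h2, if_neg (by
              rintro ⟨hi', hc⟩
              rcases List.mem_cons.mp hi' with rfl | hi'
              · exact hit rfl
              · exact h2 ⟨hi', hc⟩)]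
    · rw [bPop, if_neg h]
      have hnot : ∀ i ∈ t :: st, ¬ pref.getD (j + 1) 0 ≤ pref.getD i 0 := by
        intro i hi
        rcases List.mem_cons.mp hi with rfl | hi'
        · exact h
        · have hit : i < t := List.rel_of_pairwise_cons hsort hi'
          have := hmono i hi t List.mem_cons_self hit
          omega
      constructor
      · intro i
        constructor
        · intro hi; exact ⟨hi, hnot i hi⟩
        · exact fun hi => hi.1
      · intro i d _
        rw [if_neg (fun hc => hnot i hc.1 hc.2)]

theorem inv_step (pref : List Int) (n J : Nat) (st close : List Nat)
    (hJ : J < n) (h : pvInv pref n J st close) :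
    pvInv pref n (J + 1) (bPop pref J (J :: st) close).1 (bPop pref J (J :: st) close).2 := by
  obtain ⟨hmem, hsort, hlen, hval⟩ := h
  have hmemJ : ∀ i ∈ (J :: st), i ≤ J ∧ J ≤ fc (Qp pref) n i i := by
    intro i hi
    rcases List.mem_cons.mp hi with rfl | hi'
    · exact ⟨Nat.le_refl _, fc_ge _ _ _ _ (Nat.le_of_lt hJ)⟩
    · have := (hmem i).mp hi'
      exact ⟨Nat.le_of_lt this.1, this.2⟩
  have hmono : ∀ a ∈ (J :: st), ∀ b ∈ (J :: st), a < b → pref.getD a 0 < pref.getD b 0 := by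
    intro a ha b hb hab
    have hb' : b ≤ J := (hmemJ b hb).1
    have ha' : J ≤ fc (Qp pref) n a a := (hmemJ a ha).2
    have h1 : ¬ Qp pref ((b - 1) + 1) ≤ Qp pref a :=
      fc_not_before (Qp pref) n a a (b - 1) (by omega) (by omega)
    rw [show (b - 1) + 1 = b from by omega] at h1
    simp only [Qp] at h1
    omega
  have hsort' : (J :: st).Pairwise (· > ·) := by
    refine List.pairwise_cons.mpr ⟨?_, hsort⟩
    intro b hb
    exact ((hmem b).mp hb).1
  obtain ⟨hstk, hcl⟩ := bPop_char pref J (J :: st) close hsort' hmono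
  -- membership of the new stack vs the fc spec
  have hiff : ∀ i, (i ∈ (J :: st) ∧ ¬ pref.getD (J + 1) 0 ≤ pref.getD i 0) ↔
      (i < J + 1 ∧ J + 1 ≤ fc (Qp pref) n i i) := by
    intro i
    constructor
    · rintro ⟨hi, hc⟩
      refine ⟨by have := (hmemJ i hi).1; omega, ?_⟩
      have hge := (hmemJ i hi).2
      rcases Nat.eq_or_lt_of_le hge with heq | hlt
      · exfalso
        have := fc_hit (Qp pref) n i i (by omega)
        rw [← heq] at this
        exact hc this
      · omega
    · rintro ⟨hi, hge⟩
      have hs : i ∈ (J :: st) := by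
        rcases Nat.eq_or_lt_of_le (Nat.lt_succ_iff.mp hi) with rfl | hlt
        · exact List.mem_cons_self
        · exact List.mem_cons_of_mem _ ((hmem i).mpr ⟨hlt, by omega⟩)
      refine ⟨hs, ?_⟩
      exact fc_not_before (Qp pref) n i i J (hmemJ i hs).1 (by omega)
  refine ⟨fun i => (hstk i).trans (hiff i), ?_, ?_, ?_⟩
  · exact hsort'.sublist (bPop_suffix pref J (J :: st) close).sublist
  · rw [bPop_close_length, hlen]
  · intro i hi
    rw [hcl i n (by omega)]
    have hpop : (i ∈ (J :: st) ∧ pref.getD (J + 1) 0 ≤ pref.getD i 0) ↔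
        fc (Qp pref) n i i = J := by
      constructor
      · rintro ⟨hs, hc⟩
        have hge := (hmemJ i hs).2
        rcases Nat.eq_or_lt_of_le hge with heq | hlt
        · omega
        · exfalso
          exact fc_not_before (Qp pref) n i i J (hmemJ i hs).1 hlt hc
      · intro heq
        have hc : pref.getD (J + 1) 0 ≤ pref.getD i 0 := by
          have := fc_hit (Qp pref) n i i (by omega)
          rw [heq] at this
          exact this
        have hile : i ≤ J := by
          have := fc_ge (Qp pref) n i i (Nat.le_of_lt hi)
          omega
        have hs : i ∈ (J :: st) := by
          rcases Nat.eq_or_lt_of_le hile with rfl | hlt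
          · exact List.mem_cons_self
          · exact List.mem_cons_of_mem _ ((hmem i).mpr ⟨hlt, by omega⟩)
        exact ⟨hs, hc⟩
    rcases Nat.lt_trichotomy (fc (Qp pref) n i i) J with hlt | heq | hgt
    · rw [if_neg (fun hc => by have := hpop.mp hc; omega : ¬ _), hval i hi,
        if_pos hlt, if_pos (by omega)]
    · rw [if_pos (hpop.mpr heq), if_pos (by omega), heq]
    · rw [if_neg (fun hc => by have := hpop.mp hc; omega : ¬ _), hval i hi,
        if_neg (by omega), if_neg (by omega)]

theorem inv_sFold (pref : List Int) (n : Nat) : ∀ J, J ≤ n →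
    pvInv pref n J (sFold pref n J).1 (sFold pref n J).2 := by
  intro J
  induction J with
  | zero =>
    intro _
    refine ⟨fun i => by simp [sFold], by simp [sFold], by simp [sFold], ?_⟩
    intro i hi
    simp only [sFold, List.range_zero, List.foldl_nil]
    rw [if_neg (by omega), List.getD_eq_getElem?_getD, List.getElem?_replicate_of_lt hi]
    rfl
  | succ J ih =>
    intro hJ
    have hstep : sFold pref n (J + 1)
        = bPop pref J (J :: (sFold pref n J).1) (sFold pref n J).2 := by
      rw [sFold, List.range_succ, List.foldl_append, List.foldl_cons, List.foldl_nil]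
      rfl
    rw [hstep]
    exact inv_step pref n J _ _ (by omega) (ih (by omega))

theorem bClose_getD (pref : List Int) (n : Nat) (i : Nat) (hi : i < n) :
    (bClose pref n).getD i n = fc (Qp pref) n i i := by
  have h := (inv_sFold pref n n (Nat.le_refl n)).2.2.2 i hi
  have hle := fc_le (Qp pref) n i i
  rw [show bClose pref n = (sFold pref n n).2 from rfl, h]
  rcases Nat.lt_or_ge (fc (Qp pref) n i i) n with hlt | hge
  · rw [if_pos hlt]
  · rw [if_neg (by omega)]; omega

-- ===== the walk equals A's outer loop =====

theorem walk_eq (lines : List String) (close : List Nat)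
    (hclose : ∀ i, i < lines.length → close.getD i lines.length = fc (Qp (bPrefix lines)) lines.length i i) :
    ∀ (fuel i : Nat), lines.length ≤ i + fuel →
    bWalk lines close i = aGo (lines.drop i) := by
  intro fuel
  induction fuel with
  | zero =>
    intro i hi
    rw [bWalk, dif_neg (by omega : ¬ i < lines.length),
      List.drop_of_length_le (by omega), aGo]
  | succ f ih =>
    intro i hi
    by_cases h1 : i < lines.length
    · have hdrop : lines.drop i = lines[i] :: lines.drop (i + 1) := List.drop_eq_getElem_cons h1
      have hget : lines.getD i "" = lines[i] := List.getD_eq_getElem _ _ h1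
      by_cases hm : PySem.Str.isIn pvMarker (lines.getD i "")
      · rw [bWalk, dif_pos h1, if_pos hm, hclose i h1,
          dif_pos (by have := fc_ge (Qp (bPrefix lines)) lines.length i i (by omega); omega)]
        rw [hdrop, aGo, if_pos (by rw [← hget]; exact hm)]
        have hQ := Qp_succ lines i h1
        rw [hget] at hQ
        rw [show pvDelta lines[i]
            = Qp (bPrefix lines) (i + 1) - Qp (bPrefix lines) i from by omega]
        rw [aSkip_drop lines i lines.length (i + 1) (by omega),
          fl_fc (Qp (bPrefix lines)) lines.length i i]
        rcases Nat.lt_or_ge (fc (Qp (bPrefix lines)) lines.length i i) lines.length with hlt | hge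
        · rw [show min (fc (Qp (bPrefix lines)) lines.length i i + 1) lines.length
              = fc (Qp (bPrefix lines)) lines.length i i + 1 from by omega]
          exact ih (fc (Qp (bPrefix lines)) lines.length i i + 1)
            (by have := fc_ge (Qp (bPrefix lines)) lines.length i i (by omega); omega)
        · have hfe : fc (Qp (bPrefix lines)) lines.length i i = lines.length := by
            have := fc_le (Qp (bPrefix lines)) lines.length i i
            omega
          rw [hfe, show min (lines.length + 1) lines.length = lines.length from by omega,
            List.drop_length, aGo, bWalk, dif_neg (by omega : ¬ lines.length + 1 < lines.length)]
      · rw [bWalk, dif_pos h1, if_neg hm, hdrop, aGo, if_neg (by rw [← hget]; exact hm), hget]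
        rw [ih (i + 1) (by omega)]
    · rw [bWalk, dif_neg h1, List.drop_of_length_le (by omega), aGo]

-- ===== VERDICT (by name: the statement is the Claim_ definition above) =====
theorem remove_demo_blocks_spec : Claim_equal_remove_demo_blocks := by
  intro text _
  unfold Spec_remove_demo_blocks remove_demo_blocks remove_demo_blocks_alt
  have h := walk_eq ((PySem.Str.split? text "\n").getD [])
    (bClose (bPrefix ((PySem.Str.split? text "\n").getD [])) ((PySem.Str.split? text "\n").getD []).length)
    (fun i hi => bClose_getD _ _ i hi)
    ((PySem.Str.split? text "\n").getD []).length 0 (by omega)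
  simp only [List.drop_zero] at h
  exact (congrArg (PySem.Str.join "\n") h).symm
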